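-- pv_equiv track=rewrite | github.com/timmyyuan/gobench-eq | dataset/cases/goeq-ojva-0086/source/prog_b/original.py | shiharai
-- ===== SOURCE A (Python) =====
-- clst=[10,50,100,500]
--
-- def sgn(t):
-- 	for A in range(0,4):
-- 		if clst[A]==t:return A
--
-- def cnt(l1,l2,N):A=sgn(l1[N]);l2[A]=l2[A]+1
--
-- def shiharai(bill,purse):
-- 	D=purse;B=bill;C=[];E=[0]
-- 	for A in range(0,4):
-- 		for F in range(0,D[A]):C.append(clst[A])
-- 	E[0]=C[0]
-- 	for A in range(1,len(C)):H=C[A]+E[A-1];E.append(H)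
-- 	G=[0,0,0,0]
-- 	while B>0:
-- 		A=0
-- 		while E[A]<B:A=A+1
-- 		if E[A]==B:
-- 			for F in range(0,A+1):cnt(C,G,F);B=B-C[F]
-- 		else:cnt(C,G,A);B=B-C[A]
-- 	for A in range(4):D[A]=D[A]-G[A]
-- 	D[0]=D[0]-B//10;return D
-- ===== SOURCE B (Python) =====
-- def shiharai(bill, purse):
--     # O(1) arithmetic over per-denomination prefix sums; no expanded coin list.
--     clst = [10, 50, 100, 500]
--     counts = [max(purse[i], 0) for i in range(4)]
--     S = []
--     s = 0
--     for i in range(4):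
--         s += counts[i] * clst[i]
--         S.append(s)
--     G = [0, 0, 0, 0]
--     B = bill
--     while B > 0:
--         k = 0
--         while k < 4 and S[k] < B:
--             k += 1
--         if k == 4:
--             break  # A raises IndexError here (bill exceeds purse total); outside Pre_
--         v = clst[k]
--         lo = S[k - 1] if k > 0 else 0
--         r = B - lo
--         q, rem = divmod(r, v)
--         if rem == 0:
--             for j in range(k):
--                 G[j] += counts[j]
--             G[k] += q
--             B = 0
--         else:
--             G[k] += q + 1
--             B -= (q + 1) * v
--     for j in range(4):
--         purse[j] -= G[j]
--     purse[0] -= B // 10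
--     return purse
-- ===== Notes on version B (the rewrite author's own statement) =====
-- stated objective: faster
-- what changed: B replaces A's expanded per-coin list, its prefix-sum array, and the per-coin linear-rescan payment loop by O(1) arithmetic on the four per-denomination prefix sums, paying a whole run of equal coins in one divmod step (at most 4 phases).
import Mathlib
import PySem

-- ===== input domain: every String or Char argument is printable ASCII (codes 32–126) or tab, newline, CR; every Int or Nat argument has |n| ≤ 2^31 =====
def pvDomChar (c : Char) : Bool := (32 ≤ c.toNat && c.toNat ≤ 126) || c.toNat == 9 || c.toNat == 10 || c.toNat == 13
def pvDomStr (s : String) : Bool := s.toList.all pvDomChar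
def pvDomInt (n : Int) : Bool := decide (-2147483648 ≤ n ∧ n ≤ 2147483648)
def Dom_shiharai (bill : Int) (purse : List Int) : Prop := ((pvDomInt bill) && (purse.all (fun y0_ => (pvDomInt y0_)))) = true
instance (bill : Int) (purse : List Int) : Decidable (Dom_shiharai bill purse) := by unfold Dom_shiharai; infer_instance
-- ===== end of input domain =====

-- B replaces A's expanded per-coin list, prefix array and per-coin linear rescans by O(1)
-- divmod arithmetic on the four per-denomination prefix sums (≤ 4 phases); A mutates `purse`
-- in place and B performs the same mutation — the theorems here are about the return value.

-- ===== PORT A =====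
def pvClst : List Int := [10, 50, 100, 500]

-- sgn(t): first index A in range(4) with clst[A]==t
def pvSgn (t : Int) : Option Nat := (List.range 4).find? (fun A => pvClst.getD A 0 == t)

-- body of cnt: l2[sgn(t)] += 1  (None from sgn would be a Python TypeError; unreachable here)
def pvBump (t : Int) (l2 : List Int) : List Int :=
  match pvSgn t with
  | some A => l2.set A (l2.getD A 0 + 1)
  | none => l2

def pvCnt (l1 l2 : List Int) (N : Nat) : List Int := pvBump (l1.getD N 0) l2

-- E[0]=C[0]; E.append(C[A]+E[A-1]): running prefix sums of C
-- (tail-recursive accumulator for the Python append loop; reversed at the end)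
def pvPrefixAux : List Int → Int → List Int → List Int
  | [], _, acc => acc.reverse
  | c :: cs, s, acc => pvPrefixAux cs (s + c) ((s + c) :: acc)

def pvPrefix (xs : List Int) (s : Int) : List Int := pvPrefixAux xs s []

-- A=0; while E[A]<B: A=A+1   (none = Python IndexError, excluded by Pre_)
def pvScan (E : List Int) (B : Int) (i : Nat) : Option Nat :=
  match E with
  | [] => none
  | e :: rest => if e < B then pvScan rest B (i + 1) else some i

-- while B>0: … (fuel is only a totality guard; it never runs out on inputs in Pre_)
def pvLoopA (C E : List Int) : Nat → Int → List Int → Int × List Int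
  | 0, B, G => (B, G)
  | f + 1, B, G =>
    if B > 0 then
      match pvScan E B 0 with
      | none => (B, G)     -- Python raises IndexError here (excluded by Pre_)
      | some A =>
        if E.getD A 0 == B then
          let p := (List.range (A + 1)).foldl
            (fun (p : Int × List Int) F => (p.1 - C.getD F 0, pvCnt C p.2 F)) (B, G)
          pvLoopA C E f p.1 p.2
        else
          pvLoopA C E f (B - C.getD A 0) (pvCnt C G A)
    else (B, G)

def shiharai (bill : Int) (purse : List Int) : List Int :=
  let C : List Int := (List.range 4).foldl
    (fun c A => c ++ List.replicate (purse.getD A 0).toNat (pvClst.getD A 0)) []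
  let E : List Int := pvPrefix C 0
  let p := pvLoopA C E (bill.toNat + 2) bill [0, 0, 0, 0]
  let D := (List.range 4).foldl (fun (d : List Int) A => d.set A (d.getD A 0 - p.2.getD A 0)) purse
  D.set 0 (D.getD 0 0 - PySem.Int.floordiv p.1 10)

-- ===== PORT B =====
-- k=0; while k<4 and S[k]<B: k+=1
def pvFindK (S : List Int) (B : Int) (k : Nat) : Nat :=
  if k < 4 then (if S.getD k 0 < B then pvFindK S B (k + 1) else k) else k
  termination_by 4 - k

-- while B>0: one divmod phase per denomination run (fuel only a totality guard)
def pvLoopB (counts S : List Int) : Nat → Int → List Int → Int × List Int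
  | 0, B, G => (B, G)
  | f + 1, B, G =>
    if B > 0 then
      let k := pvFindK S B 0
      if k == 4 then (B, G)      -- break: bill exceeds purse total (A raises there; outside Pre_)
      else
        let v := pvClst.getD k 0
        let lo := if k > 0 then S.getD (k - 1) 0 else 0
        let r := B - lo
        let q := PySem.Int.floordiv r v
        let rem := PySem.Int.mod r v
        if rem == 0 then
          let G' := (List.range k).foldl (fun (g : List Int) j => g.set j (g.getD j 0 + counts.getD j 0)) G
          pvLoopB counts S f 0 (G'.set k (G'.getD k 0 + q))
        else
          pvLoopB counts S f (B - (q + 1) * v) (G.set k (G.getD k 0 + (q + 1)))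
    else (B, G)

def shiharai_alt (bill : Int) (purse : List Int) : List Int :=
  let counts : List Int := (List.range 4).map (fun i => max (purse.getD i 0) 0)
  let S : List Int := ((List.range 4).foldl
    (fun (p : List Int × Int) i =>
      let s := p.2 + counts.getD i 0 * pvClst.getD i 0
      (p.1 ++ [s], s)) ([], 0)).1
  let p := pvLoopB counts S (bill.toNat + 2) bill [0, 0, 0, 0]
  let D := (List.range 4).foldl (fun (d : List Int) j => d.set j (d.getD j 0 - p.2.getD j 0)) purse
  D.set 0 (D.getD 0 0 - PySem.Int.floordiv p.1 10)

-- ===== PRECONDITION & SPEC =====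
-- total value of the (non-negatively counted) first four purse entries; Pre_ = exactly the
-- inputs where Python A returns: len(purse) ≥ 4, at least one coin exists (else E[0]=C[0]
-- raises IndexError) and bill does not exceed the purse total (else the inner scan raises).
def pvTotal (purse : List Int) : Int :=
  10 * max (purse.getD 0 0) 0 + 50 * max (purse.getD 1 0) 0 +
  100 * max (purse.getD 2 0) 0 + 500 * max (purse.getD 3 0) 0

def Pre_shiharai (bill : Int) (purse : List Int) : Prop :=
  4 ≤ purse.length ∧ 0 < pvTotal purse ∧ bill ≤ pvTotal purse
instance (bill : Int) (purse : List Int) : Decidable (Pre_shiharai bill purse) := by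
  unfold Pre_shiharai; infer_instance

def pvWitness_shiharai : Int × List Int := (120, [3, 2, 1, 1])

def Spec_shiharai (bill : Int) (purse : List Int) (out : List Int) : Prop := out = shiharai_alt bill purse
instance (bill : Int) (purse : List Int) (out : List Int) : Decidable (Spec_shiharai bill purse out) := by
  unfold Spec_shiharai; infer_instance

-- ===== CLAIM (what is proved, stated in full; the proofs are below) =====
def Claim_equal_shiharai : Prop := ∀ (bill : Int) (purse : List Int), Dom_shiharai bill purse → Pre_shiharai bill purse → Spec_shiharai bill purse (shiharai bill purse)


-- ===== LEMMAS AND PROOFS =====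

-- non-tail-recursive reference form of pvPrefix, used by the proofs
def pvPrefixR : List Int → Int → List Int
  | [], _ => []
  | c :: cs, s => (s + c) :: pvPrefixR cs (s + c)

lemma pvPrefixAux_eq (xs : List Int) : ∀ (s : Int) (acc : List Int),
    pvPrefixAux xs s acc = acc.reverse ++ pvPrefixR xs s := by
  induction xs with
  | nil => intro s acc; simp [pvPrefixAux, pvPrefixR]
  | cons c cs ih => intro s acc; simp [pvPrefixAux, pvPrefixR, ih]

lemma pvPrefix_eq (xs : List Int) (s : Int) : pvPrefix xs s = pvPrefixR xs s := by
  simp [pvPrefix, pvPrefixAux_eq]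

-- canonical shapes of the data both ports compute from `purse`
def pvCC (a b c d : Nat) : List Int :=
  List.replicate a 10 ++ (List.replicate b 50 ++ (List.replicate c 100 ++ List.replicate d 500))

def pvSS (a b c d : Nat) : List Int :=
  [(a:Int)*10, (a:Int)*10 + (b:Int)*50, (a:Int)*10 + (b:Int)*50 + (c:Int)*100,
   (a:Int)*10 + (b:Int)*50 + (c:Int)*100 + (d:Int)*500]

lemma pv_getD_append_add (l1 l2 : List Int) (j : Nat) (d : Int) :
    (l1 ++ l2).getD (l1.length + j) d = l2.getD j d := by
  simp [List.getD_eq_getElem?_getD, List.getElem?_append_right (Nat.le_add_right _ _)]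

lemma pv_getD_append_lt (l1 l2 : List Int) (j : Nat) (d : Int) (h : j < l1.length) :
    (l1 ++ l2).getD j d = l1.getD j d := by
  simp [List.getD_eq_getElem?_getD, List.getElem?_append_left h]

lemma pv_getD_set_self (l : List Int) (i : Nat) (a d : Int) (h : i < l.length) :
    (l.set i a).getD i d = a := by
  simp [List.getD_eq_getElem?_getD, h]

lemma pv_set_getD_self (l : List Int) (i : Nat) (h : i < l.length) :
    l.set i (l.getD i 0) = l := by
  simp [List.getD_eq_getElem?_getD, List.getElem?_eq_getElem h]

lemma pvPrefixR_append (xs ys : List Int) (s : Int) :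
    pvPrefixR (xs ++ ys) s = pvPrefixR xs s ++ pvPrefixR ys (s + xs.sum) := by
  induction xs generalizing s with
  | nil => simp [pvPrefixR]
  | cons x xs ih => simp [pvPrefixR, ih, add_assoc]

lemma pvPrefixR_length (xs : List Int) (s : Int) : (pvPrefixR xs s).length = xs.length := by
  induction xs generalizing s <;> simp [pvPrefixR, *]

lemma pvPrefixR_replicate (n : Nat) (v s : Int) :
    pvPrefixR (List.replicate n v) s = (List.range n).map (fun (j : Nat) => s + ((j:Int)+1)*v) := by
  induction n generalizing s with
  | zero => simp [pvPrefixR]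
  | succ n ih =>
    rw [List.replicate_succ, List.range_succ_eq_map]
    simp only [pvPrefixR, ih, List.map_cons, List.map_map]
    congr 1
    · push_cast; ring
    refine List.map_congr_left (fun j _ => ?_)
    simp [Function.comp]
    ring

lemma pv_maprange_getD (n m : Nat) (s v : Int) (h : m < n) :
    ((List.range n).map (fun (j : Nat) => s + ((j:Int)+1)*v)).getD m 0 = s + ((m:Int)+1)*v := by
  simp [List.getD_eq_getElem?_getD, h]

lemma pv_mem_pvPrefixR_le (xs : List Int) (h : ∀ x ∈ xs, 0 ≤ x) :
    ∀ (s : Int), ∀ e ∈ pvPrefixR xs s, e ≤ s + xs.sum := by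
  induction xs with
  | nil => simp [pvPrefixR]
  | cons x xs ih =>
    intro s e he
    have hx : 0 ≤ x := h x (by simp)
    have hxs : ∀ y ∈ xs, 0 ≤ y := fun y hy => h y (by simp [hy])
    simp only [pvPrefixR, List.mem_cons] at he
    rcases he with rfl | he
    · have : 0 ≤ xs.sum := List.sum_nonneg hxs
      simp; omega
    · have := ih hxs (s + x) e he
      simp at this ⊢
      omega

lemma pvScan_append_left (E1 E2 : List Int) (B : Int) :
    ∀ (i j : Nat), pvScan E1 B i = some j → pvScan (E1 ++ E2) B i = some j := by
  induction E1 with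
  | nil => intro i j h; simp [pvScan] at h
  | cons e rest ih =>
    intro i j h
    by_cases he : e < B
    · simp only [pvScan, if_pos he] at h
      simpa only [List.cons_append, pvScan, if_pos he] using ih _ _ h
    · simp only [pvScan, if_neg he] at h
      simpa only [List.cons_append, pvScan, if_neg he] using h

lemma pvScan_skip (E1 E2 : List Int) (B : Int) (h : ∀ e ∈ E1, e < B) :
    ∀ (i : Nat), pvScan (E1 ++ E2) B i = pvScan E2 B (i + E1.length) := by
  induction E1 with
  | nil => intro i; simp
  | cons e rest ih =>
    intro i
    have he : e < B := h e (by simp)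
    have hr : ∀ x ∈ rest, x < B := fun x hx => h x (by simp [hx])
    simp only [List.cons_append, pvScan, if_pos he]
    rw [ih hr]
    congr 1
    simp
    omega

lemma pvScan_found (B : Int) : ∀ (E : List Int) (i j0 : Nat), j0 < E.length →
    (∀ m, m < j0 → E.getD m 0 < B) → B ≤ E.getD j0 0 → pvScan E B i = some (i + j0) := by
  intro E
  induction E with
  | nil => intro i j0 h; simp at h
  | cons e rest ih =>
    intro i j0 hlen hlt hge
    cases j0 with
    | zero =>
      simp only [List.getD_cons_zero] at hge
      simp [pvScan, not_lt.mpr hge]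
    | succ j =>
      have he : e < B := by simpa using hlt 0 (Nat.succ_pos _)
      simp only [pvScan, if_pos he]
      rw [ih (i+1) j (by simpa using hlen)
        (fun m hm => by simpa using hlt (m+1) (by omega)) (by simpa using hge)]
      congr 1
      omega

lemma pvLocate (C1 C2 : List Int) (v : Int) (n j0 : Nat) (B : Int)
    (hC1 : ∀ x ∈ C1, 0 ≤ x) (hv : 0 < v) (hj : j0 < n)
    (h1 : C1.sum + (j0:Int)*v < B) (h2 : B ≤ C1.sum + ((j0:Int)+1)*v) :
    pvScan (pvPrefixR (C1 ++ (List.replicate n v ++ C2)) 0) B 0 = some (C1.length + j0) ∧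
    (pvPrefixR (C1 ++ (List.replicate n v ++ C2)) 0).getD (C1.length + j0) 0 = C1.sum + ((j0:Int)+1)*v ∧
    (C1 ++ (List.replicate n v ++ C2)).getD (C1.length + j0) 0 = v ∧
    (C1 ++ (List.replicate n v ++ C2)).take (C1.length + j0 + 1) = C1 ++ List.replicate (j0+1) v := by
  have hs0 : (0:Int) ≤ C1.sum := List.sum_nonneg hC1
  have hj0v : (0:Int) ≤ (j0:Int)*v := mul_nonneg (by positivity) hv.le
  have hsB : C1.sum < B := by omega
  have hrep : pvPrefixR (List.replicate n v) C1.sum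
      = (List.range n).map (fun (j : Nat) => C1.sum + ((j:Int)+1)*v) := pvPrefixR_replicate n v _
  have hlenrep : (pvPrefixR (List.replicate n v) C1.sum).length = n := by
    rw [hrep]; simp
  have hgetDrep : ∀ m, m < n → (pvPrefixR (List.replicate n v) C1.sum).getD m 0
      = C1.sum + ((m:Int)+1)*v := by
    intro m hm; rw [hrep]; exact pv_maprange_getD n m _ v hm
  have hE : pvPrefixR (C1 ++ (List.replicate n v ++ C2)) 0
      = pvPrefixR C1 0 ++ (pvPrefixR (List.replicate n v) C1.sum
          ++ pvPrefixR C2 (C1.sum + (n:Int)*v)) := by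
    rw [pvPrefixR_append, pvPrefixR_append]
    simp [List.sum_replicate, zero_add]
  have hlt : ∀ m, m < j0 → (pvPrefixR (List.replicate n v) C1.sum).getD m 0 < B := by
    intro m hm
    rw [hgetDrep m (by omega)]
    have : ((m:Int)+1)*v ≤ (j0:Int)*v := by
      apply mul_le_mul_of_nonneg_right _ hv.le
      exact_mod_cast hm
    omega
  have hscan : pvScan (pvPrefixR (C1 ++ (List.replicate n v ++ C2)) 0) B 0
      = some (C1.length + j0) := by
    rw [hE, pvScan_skip _ _ _ (fun e he => lt_of_le_of_lt (by simpa using pv_mem_pvPrefixR_le C1 hC1 0 e he) hsB)]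
    rw [pvPrefixR_length, Nat.zero_add]
    apply pvScan_append_left
    apply pvScan_found B _ _ j0 (by omega) hlt
    rw [hgetDrep j0 hj]
    exact h2
  refine ⟨hscan, ?_, ?_, ?_⟩
  · rw [hE]
    have h1' : (pvPrefixR C1 0).length = C1.length := pvPrefixR_length C1 0
    rw [← h1', pv_getD_append_add, pv_getD_append_lt _ _ _ _ (by omega)]
    exact hgetDrep j0 hj
  · rw [pv_getD_append_add, pv_getD_append_lt _ _ _ _ (by simpa using hj)]
    simp [List.getD_eq_getElem?_getD, hj]
  · rw [Nat.add_assoc, List.take_length_add_append,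
      List.take_append_of_le_length (by simpa using hj), List.take_replicate]
    congr 2
    omega

lemma pvFoldlRange {β : Type} (L : List Int) (f : β → Int → β) :
    ∀ (n : Nat), n ≤ L.length → ∀ (p0 : β),
      (List.range n).foldl (fun p F => f p (L.getD F 0)) p0 = (L.take n).foldl f p0 := by
  intro n
  induction n with
  | zero => simp
  | succ n ih =>
    intro h p0
    have hn : n < L.length := by omega
    rw [List.range_succ, List.foldl_append, ih (by omega),
      (by rw [List.take_add_one, List.getElem?_eq_getElem hn]; rfl
        : L.take (n+1) = L.take n ++ [L[n]]),
      List.foldl_append]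
    simp [List.getD_eq_getElem?_getD, List.getElem?_eq_getElem hn]

lemma pvFoldlRep (v : Int) (k : Nat) (hs : pvSgn v = some k) :
    ∀ (m : Nat) (B : Int) (G : List Int), k < G.length →
      (List.replicate m v).foldl (fun (p : Int × List Int) c => (p.1 - c, pvBump c p.2)) (B, G)
        = (B - (m:Int)*v, G.set k (G.getD k 0 + (m:Int))) := by
  intro m
  induction m with
  | zero =>
    intro B G hk
    simp only [List.replicate_zero, List.foldl_nil, Nat.cast_zero, zero_mul, sub_zero, add_zero]
    rw [pv_set_getD_self G k hk]
  | succ m ih =>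
    intro B G hk
    rw [List.replicate_succ]
    simp only [List.foldl_cons]
    rw [show pvBump v G = G.set k (G.getD k 0 + 1) by simp [pvBump, hs]]
    rw [ih _ _ (by simpa using hk)]
    rw [List.set_set, pv_getD_set_self _ _ _ _ hk]
    simp only [Prod.mk.injEq]
    constructor <;> push_cast <;> ring

lemma pvLoopA_nonpos (C E : List Int) (f : Nat) (B : Int) (G : List Int) (h : B ≤ 0) :
    pvLoopA C E f B G = (B, G) := by
  cases f <;> simp [pvLoopA, not_lt.mpr h]

lemma pvLoopB_nonpos (counts S : List Int) (f : Nat) (B : Int) (G : List Int) (h : B ≤ 0) :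
    pvLoopB counts S f B G = (B, G) := by
  cases f <;> simp [pvLoopB, not_lt.mpr h]

-- one whole run of equal coins: the else-branch fires m+1 times, one coin per iteration
lemma pvPhaseA (C1 C2 : List Int) (v : Int) (n k : Nat) (rem : Int)
    (hC1 : ∀ x ∈ C1, 0 ≤ x) (hv : 0 < v) (hsgn : pvSgn v = some k) (hk4 : k < 4)
    (hrem1 : 0 < rem) (hrem2 : rem < v) :
    ∀ (m : Nat) (B : Int) (G : List Int) (f : Nat), G.length = 4 →
      B = C1.sum + (m:Int)*v + rem → m < n →
      pvLoopA (C1 ++ (List.replicate n v ++ C2)) (pvPrefixR (C1 ++ (List.replicate n v ++ C2)) 0)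
          (f + (m+1)) B G
        = pvLoopA (C1 ++ (List.replicate n v ++ C2)) (pvPrefixR (C1 ++ (List.replicate n v ++ C2)) 0)
          f (C1.sum + rem - v) (G.set k (G.getD k 0 + ((m:Int)+1))) := by
  intro m
  induction m with
  | zero =>
    intro B G f hG hB hmn
    have hs0 : (0:Int) ≤ C1.sum := List.sum_nonneg hC1
    have hB' : B = C1.sum + rem := by rw [hB]; push_cast; ring
    have hBpos : 0 < B := by omega
    obtain ⟨hscan, hEget, hCget, _⟩ := pvLocate C1 C2 v n 0 B hC1 hv hmn
      (by simp only [Nat.cast_zero, zero_mul, add_zero]; omega)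
      (by simp only [Nat.cast_zero, zero_add, one_mul]; omega)
    show pvLoopA _ _ (f + 0 + 1) B G = _
    rw [pvLoopA]
    rw [if_pos hBpos, hscan]
    simp only [hEget, hCget]
    rw [if_neg (by simp only [beq_iff_eq, Nat.cast_zero, zero_add, one_mul]; omega)]
    rw [show pvCnt _ G (C1.length + 0) = pvBump v G by rw [pvCnt, hCget]]
    rw [show pvBump v G = G.set k (G.getD k 0 + 1) by simp [pvBump, hsgn]]
    rw [show B - v = C1.sum + rem - v by omega]
    norm_num
  | succ m ih =>
    intro m0B G f hG hB hmn
    have hs0 : (0:Int) ≤ C1.sum := List.sum_nonneg hC1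
    have hmv : (0:Int) ≤ ((m+1 : Nat):Int)*v := by positivity
    have hBpos : 0 < m0B := by linarith [hB.ge]
    obtain ⟨hscan, hEget, hCget, _⟩ := pvLocate C1 C2 v n (m+1) m0B hC1 hv hmn
      (by rw [hB]; linarith)
      (by rw [hB, add_mul, one_mul]; linarith)
    show pvLoopA _ _ (f + (m + 2)) m0B G = _
    rw [show f + (m+2) = (f + (m+1)) + 1 by omega, pvLoopA]
    rw [if_pos hBpos, hscan]
    simp only [hEget, hCget]
    rw [if_neg (by
      simp only [beq_iff_eq]
      rw [hB, add_mul, one_mul]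
      intro hcon
      linarith)]
    rw [show pvCnt _ G (C1.length + (m+1)) = pvBump v G by rw [pvCnt, hCget]]
    rw [show pvBump v G = G.set k (G.getD k 0 + 1) by simp [pvBump, hsgn]]
    rw [ih (m0B - v) _ f (by simpa using hG) (by rw [hB]; push_cast; ring) (by omega)]
    rw [List.set_set, pv_getD_set_self _ _ _ _ (by omega)]
    congr 2
    push_cast
    ring

lemma pvPairFold (C1 : List Int) : ∀ (B : Int) (G : List Int),
    C1.foldl (fun (p : Int × List Int) c => (p.1 - c, pvBump c p.2)) (B, G)
      = (B - C1.sum, C1.foldl (fun g c => pvBump c g) G) := by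
  induction C1 with
  | nil => simp
  | cons x xs ih =>
    intro B G
    simp only [List.foldl_cons, List.sum_cons, ih]
    congr 1
    ring

lemma pvBump_length (c : Int) (G : List Int) : (pvBump c G).length = G.length := by
  unfold pvBump
  cases pvSgn c <;> simp

lemma pvBumpFold_length (C1 : List Int) : ∀ (G : List Int),
    (C1.foldl (fun g c => pvBump c g) G).length = G.length := by
  induction C1 with
  | nil => simp
  | cons x xs ih => intro G; simp [ih, pvBump_length]

lemma pvBumpFold_rep (v : Int) (k : Nat) (hs : pvSgn v = some k) (m : Nat) (G : List Int)
    (hk : k < G.length) :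
    (List.replicate m v).foldl (fun g c => pvBump c g) G = G.set k (G.getD k 0 + (m:Int)) := by
  have h1 := pvFoldlRep v k hs m 0 G hk
  rw [pvPairFold] at h1
  exact congrArg Prod.snd h1

lemma pvCntFoldRange (C : List Int) (nn : Nat) (h : nn ≤ C.length) (p0 : Int × List Int) :
    (List.range nn).foldl (fun p F => (p.1 - C.getD F 0, pvCnt C p.2 F)) p0
      = (C.take nn).foldl (fun (p : Int × List Int) c => (p.1 - c, pvBump c p.2)) p0 :=
  pvFoldlRange C (fun (p : Int × List Int) c => (p.1 - c, pvBump c p.2)) nn h p0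

-- else-branch: one whole run, phrased on the divmod data the B port computes
lemma pvElseCase (C1 C2 : List Int) (v : Int) (n k : Nat)
    (hC1 : ∀ x ∈ C1, 0 ≤ x) (hv10 : 10 ≤ v) (hsgn : pvSgn v = some k) (hk4 : k < 4)
    (B : Int) (G : List Int) (fA : Nat) (hG : G.length = 4)
    (hr1 : C1.sum < B) (hr2 : B ≤ C1.sum + (n:Int)*v) (hfA : B.toNat ≤ fA)
    (hrem : (B - C1.sum) % v ≠ 0) :
    pvLoopA (C1 ++ (List.replicate n v ++ C2)) (pvPrefixR (C1 ++ (List.replicate n v ++ C2)) 0)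
        fA B G
      = pvLoopA (C1 ++ (List.replicate n v ++ C2)) (pvPrefixR (C1 ++ (List.replicate n v ++ C2)) 0)
        (fA - (((B - C1.sum) / v).toNat + 1)) (B - ((B - C1.sum) / v + 1) * v)
        (G.set k (G.getD k 0 + ((B - C1.sum) / v + 1))) := by
  have hv : 0 < v := by omega
  set r := B - C1.sum with hrdef
  set q := r / v with hqdef
  set rem := r % v with hremdef
  have hdm : q * v + rem = r := by rw [mul_comm]; exact Int.mul_ediv_add_emod r v
  have hrem0 : 0 ≤ rem := Int.emod_nonneg r (by omega)
  have hremlt : rem < v := Int.emod_lt_of_pos r hv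
  have hq0 : 0 ≤ q := Int.ediv_nonneg (by omega) hv.le
  clear_value q rem
  have hq10 : q*10 ≤ q*v := mul_le_mul_of_nonneg_left hv10 hq0
  have hqB : q + 1 ≤ B := by nlinarith [List.sum_nonneg hC1]
  have hfuel : q.toNat + 1 ≤ fA := by omega
  have hqn : q < (n:Int) := by
    have h2 : q*v < (n:Int)*v := by omega
    exact lt_of_mul_lt_mul_right h2 hv.le
  have hB : B = C1.sum + ((q.toNat : Nat):Int)*v + rem := by
    rw [Int.toNat_of_nonneg hq0]
    omega
  have := pvPhaseA C1 C2 v n k rem hC1 hv hsgn hk4 (by omega) hremlt q.toNat B G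
    (fA - (q.toNat + 1)) hG hB (by omega)
  rw [show fA - (q.toNat + 1) + (q.toNat + 1) = fA by omega] at this
  have e1 : ((q.toNat : Nat):Int) = q := Int.toNat_of_nonneg hq0
  have e2 : (q+1)*v = q*v + v := by ring
  rw [this]
  congr 1
  · omega
  · congr 1
    rw [e1]

-- equality-branch: the prefix C[0..A] is paid in one Python iteration
lemma pvEqCase (C1 C2 : List Int) (v : Int) (n k : Nat)
    (hC1 : ∀ x ∈ C1, 0 ≤ x) (hv10 : 10 ≤ v) (hsgn : pvSgn v = some k) (hk4 : k < 4)
    (B : Int) (G : List Int) (fA : Nat) (hG : G.length = 4)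
    (hr1 : C1.sum < B) (hr2 : B ≤ C1.sum + (n:Int)*v) (hfA : B.toNat ≤ fA)
    (hrem : (B - C1.sum) % v = 0) :
    pvLoopA (C1 ++ (List.replicate n v ++ C2)) (pvPrefixR (C1 ++ (List.replicate n v ++ C2)) 0)
        fA B G
      = (0, (C1.foldl (fun g c => pvBump c g) G).set k
          ((C1.foldl (fun g c => pvBump c g) G).getD k 0 + (B - C1.sum) / v)) := by
  have hv : 0 < v := by omega
  set r := B - C1.sum with hrdef
  set q := r / v with hqdef
  have hdm : q * v + 0 = r := by rw [mul_comm, ← hrem]; exact Int.mul_ediv_add_emod r v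
  rw [add_zero] at hdm
  clear_value q
  have hq0 : 0 < q := by
    by_cases h : 0 < q
    · exact h
    · exfalso
      have h' : q ≤ 0 := le_of_not_gt h
      have : q * v ≤ 0 := mul_nonpos_of_nonpos_of_nonneg h' hv.le
      omega
  have hqn : q ≤ (n:Int) := by
    have h2 : q*v ≤ (n:Int)*v := by omega
    exact le_of_mul_le_mul_right h2 hv
  have hs0 : (0:Int) ≤ C1.sum := List.sum_nonneg hC1
  have hBpos : 0 < B := by omega
  obtain ⟨fA', rfl⟩ : ∃ f, fA = f + 1 := ⟨fA - 1, by omega⟩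
  have e1 : (((q - 1).toNat : Nat):Int) = q - 1 := by omega
  have e2 : (q-1)*v = q*v - v := by ring
  have e3 : (q-1+1)*v = q*v := by ring
  obtain ⟨hscan, hEget, hCget, htake⟩ := pvLocate C1 C2 v n (q-1).toNat B hC1 hv (by omega)
    (by rw [e1]; omega) (by rw [e1, e3]; omega)
  rw [pvLoopA, if_pos hBpos, hscan]
  simp only [hEget]
  rw [if_pos (by simp only [beq_iff_eq]; rw [e1, e3]; omega)]
  have hlen : C1.length + (q-1).toNat + 1 ≤ (C1 ++ (List.replicate n v ++ C2)).length := by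
    simp [List.length_append]
    omega
  rw [pvCntFoldRange _ _ hlen, htake, List.foldl_append, pvPairFold C1, pvFoldlRep v k hsgn _ _ _
    (by rw [pvBumpFold_length]; omega)]
  rw [pvLoopA_nonpos _ _ _ _ _ (by push_cast; rw [e1]; omega)]
  congr 2
  · push_cast
    rw [e1]
    omega
  · push_cast
    rw [e1]
    ring_nf

lemma pvSumRep (m : Nat) (v : Int) : (List.replicate m v).sum = (m:Int)*v := by
  simp [List.sum_replicate]

lemma pvSgn10 : pvSgn 10 = some 0 := by decide
lemma pvSgn50 : pvSgn 50 = some 1 := by decide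
lemma pvSgn100 : pvSgn 100 = some 2 := by decide
lemma pvSgn500 : pvSgn 500 = some 3 := by decide

lemma pvLoopMain (a b c d : Nat) : ∀ (N : Nat) (B : Int) (fA fB : Nat) (g0 g1 g2 g3 : Int),
    B.toNat = N → B.toNat ≤ fA → B.toNat ≤ fB →
    B ≤ (a:Int)*10 + (b:Int)*50 + (c:Int)*100 + (d:Int)*500 →
    pvLoopA (pvCC a b c d) (pvPrefixR (pvCC a b c d) 0) fA B [g0,g1,g2,g3]
      = pvLoopB [(a:Int),(b:Int),(c:Int),(d:Int)] (pvSS a b c d) fB B [g0,g1,g2,g3] := by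
  intro N
  induction N using Nat.strong_induction_on with
  | _ N ih =>
    intro B fA fB g0 g1 g2 g3 hN hfA hfB htot
    by_cases hBpos : 0 < B
    case neg =>
      rw [pvLoopA_nonpos _ _ _ _ _ (by omega), pvLoopB_nonpos _ _ _ _ _ (by omega)]
    have h1N : 1 ≤ N := by omega
    obtain ⟨fA', rfl⟩ : ∃ f, fA = f + 1 := ⟨fA - 1, by omega⟩
    obtain ⟨fB', rfl⟩ : ∃ f, fB = f + 1 := ⟨fB - 1, by omega⟩
    by_cases hk0 : B ≤ (a:Int)*10
    · -- k = 0 : coins of value 10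
      have hsplit : pvCC a b c d
          = ([] : List Int) ++ (List.replicate a 10
            ++ (List.replicate b 50 ++ (List.replicate c 100 ++ List.replicate d 500))) := rfl
      have hC1 : ∀ x ∈ ([] : List Int), (0:Int) ≤ x := by intro x hx; simp at hx
      have hsum : ([] : List Int).sum = (0:Int) := rfl
      have hfind : pvFindK (pvSS a b c d) B 0 = 0 := by
        rw [pvFindK, if_pos (show (0:Nat) < 4 by norm_num),
          if_neg (show ¬ (pvSS a b c d).getD 0 0 < B by simp [pvSS]; omega)]
      have hr1 : ([] : List Int).sum < B := by rw [hsum]; omega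
      have hr2 : B ≤ ([] : List Int).sum + (a:Int)*10 := by rw [hsum]; omega
      conv_rhs => rw [pvLoopB]
      rw [if_pos hBpos]
      simp only [hfind]
      norm_num [pvClst, pvSS]
      by_cases hrem : (10:Int) ∣ B
      · rw [if_pos hrem]
        rw [hsplit]
        rw [pvEqCase ([] : List Int) _ 10 a 0 hC1 (by norm_num) pvSgn10 (by norm_num)
            B _ (fA'+1) rfl hr1 hr2 (by omega)
            (by rw [hsum, sub_zero]; exact Int.emod_eq_zero_of_dvd hrem)]
        rw [pvLoopB_nonpos _ _ _ _ _ le_rfl]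
        simp only [List.foldl_nil, List.set_cons_succ, List.set_cons_zero, List.getD_cons_succ,
          List.getD_cons_zero, hsum, sub_zero]
      · rw [if_neg hrem]
        rw [hsplit]
        rw [pvElseCase ([] : List Int) _ 10 a 0 hC1 (by norm_num) pvSgn10 (by norm_num)
            B _ (fA'+1) rfl hr1 hr2 (by omega)
            (by rw [hsum, sub_zero]; exact fun h => hrem (Int.dvd_of_emod_eq_zero h))]
        rw [hsum]
        simp only [sub_zero, List.set_cons_succ, List.set_cons_zero, List.getD_cons_succ,
          List.getD_cons_zero]
        exact ih _ (by omega) _ _ _ _ _ _ _ rfl (by omega) (by omega) (by omega)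
    by_cases hk1 : B ≤ (a:Int)*10 + (b:Int)*50
    · -- k = 1 : coins of value 50
      have hsplit : pvCC a b c d
          = List.replicate a 10 ++ (List.replicate b 50
            ++ (List.replicate c 100 ++ List.replicate d 500)) := rfl
      have hC1 : ∀ x ∈ List.replicate a (10:Int), (0:Int) ≤ x := by
        intro x hx; rw [List.eq_of_mem_replicate hx]; norm_num
      have hsum : (List.replicate a (10:Int)).sum = (a:Int)*10 := pvSumRep a 10
      have hfind : pvFindK (pvSS a b c d) B 0 = 1 := by
        rw [pvFindK, if_pos (show (0:Nat) < 4 by norm_num),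
          if_pos (show (pvSS a b c d).getD 0 0 < B by simp [pvSS]; omega),
          pvFindK, if_pos (show (1:Nat) < 4 by norm_num),
          if_neg (show ¬ (pvSS a b c d).getD 1 0 < B by simp [pvSS]; omega)]
      have hr1 : (List.replicate a (10:Int)).sum < B := by rw [hsum]; omega
      have hr2 : B ≤ (List.replicate a (10:Int)).sum + (b:Int)*50 := by rw [hsum]; omega
      conv_rhs => rw [pvLoopB]
      rw [if_pos hBpos]
      simp only [hfind]
      norm_num [pvClst, pvSS]
      by_cases hrem : (50:Int) ∣ (B - (a:Int)*10)
      · rw [if_pos hrem]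
        rw [hsplit]
        rw [pvEqCase (List.replicate a 10) _ 50 b 1 hC1 (by norm_num) pvSgn50 (by norm_num)
            B _ (fA'+1) rfl hr1 hr2 (by omega)
            (by rw [hsum]; exact Int.emod_eq_zero_of_dvd hrem)]
        rw [pvBumpFold_rep 10 0 pvSgn10 a _ (by norm_num)]
        rw [pvLoopB_nonpos _ _ _ _ _ le_rfl]
        simp only [List.set_cons_succ, List.set_cons_zero, List.getD_cons_succ,
          List.getD_cons_zero, hsum]
      · rw [if_neg hrem]
        rw [hsplit]
        rw [pvElseCase (List.replicate a 10) _ 50 b 1 hC1 (by norm_num) pvSgn50 (by norm_num)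
            B _ (fA'+1) rfl hr1 hr2 (by omega)
            (by rw [hsum]; exact fun h => hrem (Int.dvd_of_emod_eq_zero h))]
        rw [hsum]
        simp only [List.set_cons_succ, List.set_cons_zero, List.getD_cons_succ,
          List.getD_cons_zero]
        exact ih _ (by omega) _ _ _ _ _ _ _ rfl (by omega) (by omega) (by omega)
    by_cases hk2 : B ≤ (a:Int)*10 + (b:Int)*50 + (c:Int)*100
    · -- k = 2 : coins of value 100
      have hsplit : pvCC a b c d
          = (List.replicate a 10 ++ List.replicate b 50)
            ++ (List.replicate c 100 ++ List.replicate d 500) := by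
        rw [pvCC, List.append_assoc]
      have hC1 : ∀ x ∈ List.replicate a (10:Int) ++ List.replicate b (50:Int), (0:Int) ≤ x := by
        intro x hx
        rcases List.mem_append.mp hx with h | h <;> rw [List.eq_of_mem_replicate h] <;> norm_num
      have hsum : (List.replicate a (10:Int) ++ List.replicate b (50:Int)).sum
          = (a:Int)*10 + (b:Int)*50 := by
        rw [List.sum_append, pvSumRep, pvSumRep]
      have hfind : pvFindK (pvSS a b c d) B 0 = 2 := by
        rw [pvFindK, if_pos (show (0:Nat) < 4 by norm_num),
          if_pos (show (pvSS a b c d).getD 0 0 < B by simp [pvSS]; omega),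
          pvFindK, if_pos (show (1:Nat) < 4 by norm_num),
          if_pos (show (pvSS a b c d).getD 1 0 < B by simp [pvSS]; omega),
          pvFindK, if_pos (show (2:Nat) < 4 by norm_num),
          if_neg (show ¬ (pvSS a b c d).getD 2 0 < B by simp [pvSS]; omega)]
      have hr1 : (List.replicate a (10:Int) ++ List.replicate b (50:Int)).sum < B := by
        rw [hsum]; omega
      have hr2 : B ≤ (List.replicate a (10:Int) ++ List.replicate b (50:Int)).sum + (c:Int)*100 := by
        rw [hsum]; omega
      conv_rhs => rw [pvLoopB]
      rw [if_pos hBpos]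
      simp only [hfind]
      norm_num [pvClst, pvSS]
      by_cases hrem : (100:Int) ∣ (B - ((a:Int)*10 + (b:Int)*50))
      · rw [if_pos hrem]
        rw [hsplit]
        rw [pvEqCase (List.replicate a 10 ++ List.replicate b 50) _ 100 c 2 hC1 (by norm_num)
            pvSgn100 (by norm_num) B _ (fA'+1) rfl hr1 hr2 (by omega)
            (by rw [hsum]; exact Int.emod_eq_zero_of_dvd hrem)]
        rw [List.foldl_append, pvBumpFold_rep 10 0 pvSgn10 a _ (by norm_num),
          pvBumpFold_rep 50 1 pvSgn50 b _ (by norm_num)]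
        rw [pvLoopB_nonpos _ _ _ _ _ le_rfl]
        simp only [List.set_cons_succ, List.set_cons_zero, List.getD_cons_succ,
          List.getD_cons_zero, hsum]
        norm_num [List.range_succ]
      · rw [if_neg hrem]
        rw [hsplit]
        rw [pvElseCase (List.replicate a 10 ++ List.replicate b 50) _ 100 c 2 hC1 (by norm_num)
            pvSgn100 (by norm_num) B _ (fA'+1) rfl hr1 hr2 (by omega)
            (by rw [hsum]; exact fun h => hrem (Int.dvd_of_emod_eq_zero h))]
        rw [hsum]
        simp only [List.set_cons_succ, List.set_cons_zero, List.getD_cons_succ,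
          List.getD_cons_zero]
        rw [← hsplit]
        exact ih _ (by omega) _ _ _ _ _ _ _ rfl (by omega) (by omega) (by omega)
    · -- k = 3 : coins of value 500
      have hsplit : pvCC a b c d
          = (List.replicate a 10 ++ (List.replicate b 50 ++ List.replicate c 100))
            ++ (List.replicate d 500 ++ ([] : List Int)) := by
        rw [pvCC]
        simp [List.append_assoc]
      have hC1 : ∀ x ∈ List.replicate a (10:Int)
          ++ (List.replicate b (50:Int) ++ List.replicate c (100:Int)), (0:Int) ≤ x := by
        intro x hx
        rcases List.mem_append.mp hx with h | h
        · rw [List.eq_of_mem_replicate h]; norm_num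
        · rcases List.mem_append.mp h with h2 | h2 <;> rw [List.eq_of_mem_replicate h2] <;> norm_num
      have hsum : (List.replicate a (10:Int)
          ++ (List.replicate b (50:Int) ++ List.replicate c (100:Int))).sum
          = (a:Int)*10 + (b:Int)*50 + (c:Int)*100 := by
        rw [List.sum_append, List.sum_append, pvSumRep, pvSumRep, pvSumRep]
        ring
      have hfind : pvFindK (pvSS a b c d) B 0 = 3 := by
        rw [pvFindK, if_pos (show (0:Nat) < 4 by norm_num),
          if_pos (show (pvSS a b c d).getD 0 0 < B by simp [pvSS]; omega),
          pvFindK, if_pos (show (1:Nat) < 4 by norm_num),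
          if_pos (show (pvSS a b c d).getD 1 0 < B by simp [pvSS]; omega),
          pvFindK, if_pos (show (2:Nat) < 4 by norm_num),
          if_pos (show (pvSS a b c d).getD 2 0 < B by simp [pvSS]; omega),
          pvFindK, if_pos (show (3:Nat) < 4 by norm_num),
          if_neg (show ¬ (pvSS a b c d).getD 3 0 < B by simp [pvSS]; omega)]
      have hr1 : (List.replicate a (10:Int)
          ++ (List.replicate b (50:Int) ++ List.replicate c (100:Int))).sum < B := by
        rw [hsum]; omega
      have hr2 : B ≤ (List.replicate a (10:Int)
          ++ (List.replicate b (50:Int) ++ List.replicate c (100:Int))).sum + (d:Int)*500 := by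
        rw [hsum]; omega
      conv_rhs => rw [pvLoopB]
      rw [if_pos hBpos]
      simp only [hfind]
      norm_num [pvClst, pvSS]
      by_cases hrem : (500:Int) ∣ (B - ((a:Int)*10 + (b:Int)*50 + (c:Int)*100))
      · rw [if_pos hrem]
        rw [hsplit]
        rw [pvEqCase (List.replicate a 10 ++ (List.replicate b 50 ++ List.replicate c 100)) _
            500 d 3 hC1 (by norm_num) pvSgn500 (by norm_num) B _ (fA'+1) rfl hr1 hr2 (by omega)
            (by rw [hsum]; exact Int.emod_eq_zero_of_dvd hrem)]
        rw [List.foldl_append, List.foldl_append, pvBumpFold_rep 10 0 pvSgn10 a _ (by norm_num),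
          pvBumpFold_rep 50 1 pvSgn50 b _ (by norm_num),
          pvBumpFold_rep 100 2 pvSgn100 c _ (by norm_num)]
        rw [pvLoopB_nonpos _ _ _ _ _ le_rfl]
        simp only [List.set_cons_succ, List.set_cons_zero, List.getD_cons_succ,
          List.getD_cons_zero, hsum]
        norm_num [List.range_succ]
      · rw [if_neg hrem]
        rw [hsplit]
        rw [pvElseCase (List.replicate a 10 ++ (List.replicate b 50 ++ List.replicate c 100)) _
            500 d 3 hC1 (by norm_num) pvSgn500 (by norm_num) B _ (fA'+1) rfl hr1 hr2 (by omega)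
            (by rw [hsum]; exact fun h => hrem (Int.dvd_of_emod_eq_zero h))]
        rw [hsum]
        simp only [List.set_cons_succ, List.set_cons_zero, List.getD_cons_succ,
          List.getD_cons_zero]
        rw [← hsplit]
        exact ih _ (by omega) _ _ _ _ _ _ _ rfl (by omega) (by omega) (by omega)

-- ===== VERDICT (by name: the statement is the Claim_ definition above) =====
theorem shiharai_spec : Claim_equal_shiharai := by
  intro bill purse hDom hPre
  obtain ⟨hlen, htot0, htot⟩ := hPre
  unfold pvTotal at htot0 htot
  unfold Spec_shiharai
  simp only [shiharai, shiharai_alt]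
  have hC : (List.range 4).foldl
      (fun c A => c ++ List.replicate (purse.getD A 0).toNat (pvClst.getD A 0)) []
      = pvCC (purse.getD 0 0).toNat (purse.getD 1 0).toNat (purse.getD 2 0).toNat
          (purse.getD 3 0).toNat := by
    simp [List.range_succ, pvClst, pvCC, List.append_assoc]
  have hcounts : (List.range 4).map (fun i => max (purse.getD i 0) 0)
      = [((purse.getD 0 0).toNat : Int), ((purse.getD 1 0).toNat : Int),
         ((purse.getD 2 0).toNat : Int), ((purse.getD 3 0).toNat : Int)] := by
    simp [List.range_succ]
  rw [hC, hcounts, pvPrefix_eq]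
  have hS : ((List.range 4).foldl
      (fun (p : List Int × Int) i =>
        (p.1 ++ [p.2 + [((purse.getD 0 0).toNat : Int), ((purse.getD 1 0).toNat : Int),
           ((purse.getD 2 0).toNat : Int), ((purse.getD 3 0).toNat : Int)].getD i 0
             * pvClst.getD i 0],
         p.2 + [((purse.getD 0 0).toNat : Int), ((purse.getD 1 0).toNat : Int),
           ((purse.getD 2 0).toNat : Int), ((purse.getD 3 0).toNat : Int)].getD i 0
             * pvClst.getD i 0)) ([], 0)).1
      = pvSS (purse.getD 0 0).toNat (purse.getD 1 0).toNat (purse.getD 2 0).toNat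
          (purse.getD 3 0).toNat := by
    simp [List.range_succ, pvClst, pvSS]
  rw [hS]
  rw [pvLoopMain (purse.getD 0 0).toNat (purse.getD 1 0).toNat (purse.getD 2 0).toNat
    (purse.getD 3 0).toNat bill.toNat bill (bill.toNat + 2) (bill.toNat + 2) 0 0 0 0 rfl
    (by omega) (by omega) (by omega)]
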